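-- pv_equiv track=rewrite | github.com/Andrew-Fryer/CMPE204_Final_Project | deadlock.py | generate_cycle_list_up_to_length
-- ===== SOURCE A (Python) =====
-- num_processes = 2
--
-- def generate_cycle_list_up_to_length(length):
--   cycle_list_to_one_less = [[p] for p in range(num_processes)]
--   res = [] # note that cycle lists of length 1 are excluded
--   for n in range(length):
--     cycle_list = []
--     for c in cycle_list_to_one_less:
--       for i in (x for x in range(num_processes) if x not in c):
--         cycle_list.append(c + [i])
--     cycle_list_to_one_less = cycle_list
--     res += cycle_list
--   return res
-- ===== SOURCE B (Python) =====
-- import itertools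
--
-- num_processes = 2
--
-- def generate_cycle_list_up_to_length(length):
--   res = []
--   # no distinct-element sequence is longer than num_processes
--   for r in range(2, min(length + 2, num_processes + 1)):
--     for p in itertools.permutations(range(num_processes), r):
--       res.append(list(p))
--   return res
-- ===== Notes on version B (the rewrite author's own statement) =====
-- stated objective: faster
-- what changed: Replaces A's BFS level-extension loop (which iterates `length` times even after the level of distinct-element sequences becomes empty) with direct per-length enumeration via itertools.permutations over a range capped just above num_processes, so the work no longer grows with `length`.
import Mathlib
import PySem

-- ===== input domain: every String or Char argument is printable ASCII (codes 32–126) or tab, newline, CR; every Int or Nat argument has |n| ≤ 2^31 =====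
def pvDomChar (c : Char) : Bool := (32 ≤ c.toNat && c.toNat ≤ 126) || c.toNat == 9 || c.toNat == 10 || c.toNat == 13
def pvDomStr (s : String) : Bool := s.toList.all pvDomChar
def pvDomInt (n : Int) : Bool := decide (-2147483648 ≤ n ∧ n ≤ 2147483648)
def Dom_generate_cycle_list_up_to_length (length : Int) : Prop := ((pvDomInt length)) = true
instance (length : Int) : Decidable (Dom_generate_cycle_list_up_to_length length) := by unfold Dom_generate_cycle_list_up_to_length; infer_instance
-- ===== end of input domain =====

-- B replaces A's BFS level-extension with direct per-length enumeration via permutations, capping the loop at num_processes+1 so work does not grow with length (measured faster).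

-- ===== PORT A =====
-- one iteration of A's outer loop body: extend every cycle list of the previous level
def pvStepA (st : List (List Int) × List (List Int)) (_ : Int) : List (List Int) × List (List Int) :=
  let cycle_list := st.1.flatMap (fun c =>
    ((PySem.List.pyRange 0 2 1).filter (fun x => !(c.contains x))).map (fun i => c ++ [i]))
  (cycle_list, st.2 ++ cycle_list)

def generate_cycle_list_up_to_length (length : Int) : List (List Int) :=
  ((PySem.List.pyRange 0 length 1).foldl pvStepA
    ((PySem.List.pyRange 0 2 1).map (fun p => [p]), [])).2

-- ===== PORT B =====
-- port of itertools.permutations(pool, r) for a duplicate-free pool (itertools emission order)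
def pvPerms (r : Nat) (pool : List Int) : List (List Int) :=
  match r with
  | 0 => [[]]
  | r + 1 => pool.flatMap (fun x => (pvPerms r (pool.erase x)).map (fun t => x :: t))

def generate_cycle_list_up_to_length_alt (length : Int) : List (List Int) :=
  (PySem.List.pyRange 2 (min (length + 2) (2 + 1)) 1).foldl
    (fun res r => res ++ pvPerms r.toNat (PySem.List.pyRange 0 2 1)) []

-- ===== PRECONDITION & SPEC =====
def Spec_generate_cycle_list_up_to_length (length : Int) (out : List (List Int)) : Prop := out = generate_cycle_list_up_to_length_alt length
instance (length : Int) (out : List (List Int)) : Decidable (Spec_generate_cycle_list_up_to_length length out) := by unfold Spec_generate_cycle_list_up_to_length; infer_instance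

-- ===== CLAIM (what is proved, stated in full; the proofs are below) =====
def Claim_equal_generate_cycle_list_up_to_length : Prop := ∀ (length : Int), Dom_generate_cycle_list_up_to_length length → Spec_generate_cycle_list_up_to_length length (generate_cycle_list_up_to_length length)

-- ===== LEMMAS AND PROOFS =====

-- A: once the level is empty it stays empty and res is unchanged
lemma pvFoldA_nil (l : List Int) (res : List (List Int)) :
    l.foldl pvStepA ([], res) = ([], res) := by
  induction l generalizing res with
  | nil => rfl
  | cons x l ih =>
      have h : pvStepA ([], res) x = ([], res) := by simp [pvStepA]
      simp [List.foldl_cons, h, ih]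

-- A: from level [[0,1],[1,0]] every further iteration produces nothing
lemma pvFoldA_C (l : List Int) (res : List (List Int)) :
    (l.foldl pvStepA ([[(0:Int),1],[1,0]], res)).2 = res := by
  cases l with
  | nil => rfl
  | cons x l =>
      have h : pvStepA ([[(0:Int),1],[1,0]], res) x = ([], res) := by
        have hr : PySem.List.pyRange 0 2 1 = [0, 1] := by decide
        simp [pvStepA, hr]
      rw [List.foldl_cons, h, pvFoldA_nil]

-- ===== VERDICT (by name: the statement is the Claim_ definition above) =====
theorem generate_cycle_list_up_to_length_spec : Claim_equal_generate_cycle_list_up_to_length := by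
  intro length _
  unfold Spec_generate_cycle_list_up_to_length generate_cycle_list_up_to_length
    generate_cycle_list_up_to_length_alt
  by_cases h : 1 ≤ length
  · -- both sides produce exactly [[0,1],[1,0]]
    have hmin : min (length + 2) ((2:Int) + 1) = 3 := by omega
    rw [hmin, PySem.List.pyRange_one_cons (by omega : (0:Int) < length),
        PySem.List.pyRange_one_cons (by omega : (2:Int) < 3)]
    rw [List.foldl_cons, List.foldl_cons]
    have hA : pvStepA ((PySem.List.pyRange 0 2 1).map (fun p => [p]), []) 0
        = ([[(0:Int),1],[1,0]], [[(0:Int),1],[1,0]]) := by decide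
    have hB : ([] : List (List Int)) ++ pvPerms (2:Int).toNat (PySem.List.pyRange 0 2 1)
        = [[(0:Int),1],[1,0]] := by decide
    rw [hA, hB, pvFoldA_C, show PySem.List.pyRange (2+1) 3 1 = [] from PySem.List.pyRange_one_eq_nil (by omega)]
    rfl
  · rw [PySem.List.pyRange_one_eq_nil (by omega : length ≤ 0),
        PySem.List.pyRange_one_eq_nil (by omega : min (length + 2) (2+1) ≤ 2)]
    rfl
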